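-- pv_equiv track=rewrite | github.com/deancyl/AlphaTerminal | backend/app/config/rate_limit.py | is_exempt_path
-- ===== SOURCE A (Python) =====
-- EXEMPT_PATHS = [
--     "/health",
--     "/api/v1/health",
--     "/api/v1/f9/health",
--     "/api/agent/v1/health",
--     "/api/v1/macro/health",
-- ]
--
-- def is_exempt_path(path: str) -> bool:
--     path_lower = path.lower().rstrip("/")
--     for exempt in EXEMPT_PATHS:
--         if path_lower == exempt.lower().rstrip("/"):
--             return True
--         if path_lower.startswith(exempt.lower().rstrip("/") + "/"):
--             return True
--     return False
-- ===== SOURCE B (Python) =====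
-- EXEMPT_PATHS = [
--     "/health",
--     "/api/v1/health",
--     "/api/v1/f9/health",
--     "/api/agent/v1/health",
--     "/api/v1/macro/health",
-- ]
--
-- _EXEMPT_SET = {p.lower().rstrip("/") for p in EXEMPT_PATHS}
--
-- def is_exempt_path(path: str) -> bool:
--     p = path.lower().rstrip("/")
--     for i, ch in enumerate(p):
--         if ch == "/" and p[:i] in _EXEMPT_SET:
--             return True
--     return p in _EXEMPT_SET
-- ===== Notes on version B (the rewrite author's own statement) =====
-- stated objective: alternative
-- what changed: Instead of scanning the exempt list and testing equality/startswith per entry, B precomputes a set of normalized exempt paths and makes one pass over the normalized input path, testing each slash-boundary prefix (and the whole path) with a set lookup.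
import Mathlib
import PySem

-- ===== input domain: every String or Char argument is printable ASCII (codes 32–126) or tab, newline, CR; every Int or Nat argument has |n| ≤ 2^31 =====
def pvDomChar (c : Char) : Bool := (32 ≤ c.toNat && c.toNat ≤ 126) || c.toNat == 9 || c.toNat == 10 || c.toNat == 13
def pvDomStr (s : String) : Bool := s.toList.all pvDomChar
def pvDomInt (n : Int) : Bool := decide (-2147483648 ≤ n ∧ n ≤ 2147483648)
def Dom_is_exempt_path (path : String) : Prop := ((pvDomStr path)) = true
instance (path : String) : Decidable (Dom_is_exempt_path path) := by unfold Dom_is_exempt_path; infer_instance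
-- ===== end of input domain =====

-- B replaces A's scan over the exempt list (equality / startswith per entry) by one pass over the
-- normalized path itself, testing each '/'-boundary prefix against a precomputed set (objective: alternative).

-- ===== PORT A =====
def pvExempts : List String :=
  ["/health", "/api/v1/health", "/api/v1/f9/health", "/api/agent/v1/health", "/api/v1/macro/health"]

-- Python's s.rstrip("/") (strip only the character '/'; PySem.Chars.rstrip strips whitespace, so ported by hand: exact)
def pvRstripSlash (cs : List Char) : List Char := (cs.reverse.dropWhile (· == '/')).reverse

def pvALoop (pl : List Char) : List String → Bool
  | [] => false
  | e :: rest =>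
    let el := pvRstripSlash (PySem.Chars.lower e.toList)
    if pl = el then true
    else if PySem.Chars.startswith pl (el ++ ['/']) then true
    else pvALoop pl rest

def is_exempt_path (path : String) : Bool :=
  pvALoop (pvRstripSlash (PySem.Chars.lower path.toList)) pvExempts

-- ===== PORT B =====
def pvExemptSet : PySem.Set (List Char) :=
  PySem.Set.ofList (pvExempts.map (fun e => pvRstripSlash (PySem.Chars.lower e.toList)))

def pvBScan (p : List Char) : List (Int × Char) → Bool
  | [] => pvExemptSet.contains p
  | (i, ch) :: rest =>
    if ch == '/' && pvExemptSet.contains (PySem.List.slice p none (some i)) then true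
    else pvBScan p rest

def is_exempt_path_alt (path : String) : Bool :=
  let p := pvRstripSlash (PySem.Chars.lower path.toList)
  pvBScan p (PySem.List.enumerate p)

-- ===== PRECONDITION & SPEC =====
def Spec_is_exempt_path (path : String) (out : Bool) : Prop := out = is_exempt_path_alt path
instance (path : String) (out : Bool) : Decidable (Spec_is_exempt_path path out) := by unfold Spec_is_exempt_path; infer_instance

-- ===== CLAIM (what is proved, stated in full; the proofs are below) =====
def Claim_equal_is_exempt_path : Prop := ∀ (path : String), Dom_is_exempt_path path → Spec_is_exempt_path path (is_exempt_path path)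

-- ===== LEMMAS AND PROOFS =====

-- normalization shared by both sources (exempt.lower().rstrip("/"))
def pvNorm (e : String) : List Char := pvRstripSlash (PySem.Chars.lower e.toList)

lemma pvALoop_iff (pl : List Char) (es : List String) :
    pvALoop pl es = true ↔ ∃ e ∈ es, pl = pvNorm e ∨ (pvNorm e ++ ['/']) <+: pl := by
  induction es with
  | nil => simp [pvALoop]
  | cons e rest ih =>
    simp only [pvALoop, List.mem_cons]
    split_ifs with h1 h2
    · simp only [true_iff]
      exact ⟨e, Or.inl rfl, Or.inl (by simpa [pvNorm] using h1)⟩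
    · rw [PySem.Chars.startswith_iff] at h2
      simp only [true_iff]
      exact ⟨e, Or.inl rfl, Or.inr (by simpa [pvNorm] using h2)⟩
    · rw [ih]
      constructor
      · rintro ⟨e', he', h⟩; exact ⟨e', Or.inr he', h⟩
      · rintro ⟨e', he' | he', h⟩
        · subst he'
          rcases h with h | h
          · exact absurd (by simpa [pvNorm] using h) h1
          · exact absurd ((PySem.Chars.startswith_iff _ _).mpr (by simpa [pvNorm] using h)) h2
        · exact ⟨e', he', h⟩

lemma pvBScan_iff (pl : List Char) (l : List (Int × Char)) :
    pvBScan pl l = true ↔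
      (∃ q ∈ l, q.2 = '/' ∧ PySem.List.slice pl none (some q.1) ∈ pvExemptSet) ∨ pl ∈ pvExemptSet := by
  induction l with
  | nil => simp [pvBScan]
  | cons q rest ih =>
    obtain ⟨i, ch⟩ := q
    simp only [pvBScan]
    split_ifs with h
    · simp only [Bool.and_eq_true, beq_iff_eq, PySem.Set.contains_iff] at h
      simp only [true_iff]
      exact Or.inl ⟨(i, ch), List.mem_cons_self, h.1, h.2⟩
    · rw [ih]
      simp only [Bool.and_eq_true, beq_iff_eq, PySem.Set.contains_iff, not_and] at h
      constructor
      · rintro (⟨q', hq', hh⟩ | hp)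
        · exact Or.inl ⟨q', List.mem_cons_of_mem _ hq', hh⟩
        · exact Or.inr hp
      · rintro (⟨q', hq' , hc, hs⟩ | hp)
        · rcases List.mem_cons.mp hq' with rfl | hq'
          · exact absurd hs (h hc)
          · exact Or.inl ⟨q', hq', hc, hs⟩
        · exact Or.inr hp

lemma pvPrefix_slash_iff (e pl : List Char) :
    (e ++ ['/']) <+: pl ↔ ∃ i : Nat, ∃ _ : i < pl.length, pl[i] = '/' ∧ pl.take i = e := by
  constructor
  · rintro ⟨t, ht⟩
    refine ⟨e.length, ?_, ?_, ?_⟩ <;> subst ht <;> simp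
  · rintro ⟨i, hi, hc, ht⟩
    have : e ++ ['/'] = pl.take (i + 1) := by
      rw [List.take_add_one, ← ht, List.getElem?_eq_getElem hi, hc]
      simp
    rw [this]; exact List.take_prefix _ _

lemma pvMain (pl : List Char) : pvALoop pl pvExempts = pvBScan pl (PySem.List.enumerate pl) := by
  rw [Bool.eq_iff_iff, pvALoop_iff, pvBScan_iff]
  have hmem : ∀ x, x ∈ pvExemptSet ↔ ∃ e ∈ pvExempts, pvNorm e = x := by
    intro x
    rw [pvExemptSet, PySem.Set.mem_ofList]
    simp [pvNorm]
  have henum : ∀ (i : Int) (c : Char), (i, c) ∈ PySem.List.enumerate pl ↔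
      ∃ j : Nat, ∃ _ : j < pl.length, (i : Int) = j ∧ c = pl[j] := by
    intro i c
    rw [PySem.List.enumerate_eq_zipIdx_map]
    constructor
    · intro h
      simp only [List.mem_map] at h
      obtain ⟨⟨x, j⟩, hj, heq⟩ := h
      obtain ⟨-, hlt, hx⟩ := List.mem_zipIdx hj
      cases heq
      exact ⟨j, by omega, by simp, by simp [hx]⟩
    · rintro ⟨j, hj, hi, hc⟩
      simp only [List.mem_map]
      refine ⟨(pl[j], j), ?_, by simp [hi, hc]⟩
      exact List.mem_zipIdx_iff_getElem?.mpr (by simp [hj])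
  constructor
  · rintro ⟨e, he, h | hpre⟩
    · exact Or.inr ((hmem pl).mpr ⟨e, he, h.symm⟩)
    · obtain ⟨i, hi, hc, ht⟩ := (pvPrefix_slash_iff _ _).mp hpre
      refine Or.inl ⟨((i : Int), pl[i]), (henum i pl[i]).mpr ⟨i, hi, rfl, rfl⟩, hc, ?_⟩
      show PySem.List.slice pl none (some (i : Int)) ∈ pvExemptSet
      rw [PySem.List.slice_to pl (Int.natCast_nonneg i)]
      simp only [Int.toNat_natCast]
      exact (hmem _).mpr ⟨e, he, by rw [ht]⟩
  · rintro (⟨⟨i, c⟩, hq, hc, hs⟩ | hp)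
    · obtain ⟨j, hj, hi, hcc⟩ := (henum i c).mp hq
      subst hi
      dsimp only at hs hc
      rw [PySem.List.slice_to pl (Int.natCast_nonneg j)] at hs
      simp only [Int.toNat_natCast] at hs
      obtain ⟨e, he, hne⟩ := (hmem _).mp hs
      refine ⟨e, he, Or.inr ((pvPrefix_slash_iff _ _).mpr ⟨j, hj, by rw [← hcc]; exact hc, hne.symm⟩)⟩
    · obtain ⟨e, he, hne⟩ := (hmem pl).mp hp
      exact ⟨e, he, Or.inl hne.symm⟩

-- ===== VERDICT (by name: the statement is the Claim_ definition above) =====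
theorem is_exempt_path_spec : Claim_equal_is_exempt_path := by
  intro path _
  unfold Spec_is_exempt_path is_exempt_path is_exempt_path_alt
  exact pvMain _
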